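-- pv_equiv track=rewrite | github.com/Lauracf/trap-space-control | Control.py | results_info
-- ===== SOURCE A (Python) =====
-- def results_info(CS):
-- 	"""
-- 	Returns a text stating the amount and size of the control strategies in *CS*.
-- 	**arguments**:
-- 		* *CS*: list of control strategies.
-- 	**returns**:
-- 		* *text* (string): text stating the number and size of the elements in *CS*.
-- 	**example**::
-- 		>>> results_info([{'v1': 1}, {'v2':0, 'v3':1}])
-- 	"2 control strategies, 1 of size 1, 1 of size 2"
-- 	"""
--
-- 	text = str(len(CS)) + " control strategies"
-- 	sizes = [len(x) for x in CS]
-- 	CS_sizes = list({(el, sizes.count(el)) for el in sizes})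
-- 	CS_sizes.sort()
-- 	for x in CS_sizes:
-- 		text = text + ", " + str(x[1]) + " of size " + str(x[0])
-- 	return text
-- ===== SOURCE B (Python) =====
-- def results_info(CS):
-- 	sizes = sorted(len(x) for x in CS)
-- 	text = str(len(CS)) + " control strategies"
-- 	while sizes:
-- 		s = sizes[0]
-- 		run = 1
-- 		while run < len(sizes) and sizes[run] == s:
-- 			run += 1
-- 		text = text + ", " + str(run) + " of size " + str(s)
-- 		sizes = sizes[run:]
-- 	return text
-- ===== Notes on version B (the rewrite author's own statement) =====
-- stated objective: alternative
-- what changed: Replaces the set comprehension of (size, count) pairs built by repeated sizes.count(el) scans and then sorted by a sort of the sizes list followed by one run-length grouping pass that emits each segment directly.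
import Mathlib
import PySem

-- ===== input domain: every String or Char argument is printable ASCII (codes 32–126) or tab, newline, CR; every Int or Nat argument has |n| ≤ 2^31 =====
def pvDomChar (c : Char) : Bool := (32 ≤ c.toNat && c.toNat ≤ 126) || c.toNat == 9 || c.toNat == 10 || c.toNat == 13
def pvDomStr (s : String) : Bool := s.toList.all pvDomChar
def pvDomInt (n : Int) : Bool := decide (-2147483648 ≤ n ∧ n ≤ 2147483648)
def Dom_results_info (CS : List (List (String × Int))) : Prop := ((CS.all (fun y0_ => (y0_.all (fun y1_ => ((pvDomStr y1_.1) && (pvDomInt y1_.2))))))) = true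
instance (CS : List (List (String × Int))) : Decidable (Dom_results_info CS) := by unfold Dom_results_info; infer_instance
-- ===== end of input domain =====

-- B sorts the list of sizes and emits the (count, size) segments in one run-length grouping pass, instead of A's repeated sizes.count(el) scans into a set of pairs that is then sorted; same return value.

-- ===== PORT A =====
-- transliteration of A; len(x) of a dict argument is the number of its (distinct) keys, i.e. (PySem.Dict.ofList x).size
def results_info (CS : List (List (String × Int))) : String :=
  let text := PySem.Int.toChars (CS.length : Int) ++ (" control strategies").toList
  let sizes := CS.map (fun x => ((PySem.Dict.ofList x).size : Int))
  let CS_sizes := PySem.Set.ofList (sizes.map (fun el => (el, (sizes.count el : Int))))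
  let CS_sizes := PySem.List.sorted2 CS_sizes Prod.fst Prod.snd
  let text := CS_sizes.foldl (fun t x => t ++ (", ").toList ++ PySem.Int.toChars x.2 ++ (" of size ").toList ++ PySem.Int.toChars x.1) text
  String.ofList text

-- ===== PORT B =====
-- the 'while sizes:' loop of Source B: inner while = takeWhile run count, 'sizes = sizes[run:]' = drop
def pvRunFold : List Int → List Char → List Char
  | [], text => text
  | s :: rest, text =>
    let run := 1 + (rest.takeWhile (fun y => y == s)).length
    pvRunFold (rest.drop (run - 1)) (text ++ (", ").toList ++ PySem.Int.toChars (run : Int) ++ (" of size ").toList ++ PySem.Int.toChars s)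
termination_by l => l.length
decreasing_by simp

def results_info_alt (CS : List (List (String × Int))) : String :=
  let sizes := PySem.List.sorted (CS.map (fun x => ((PySem.Dict.ofList x).size : Int))) (fun z => z)
  let text := PySem.Int.toChars (CS.length : Int) ++ (" control strategies").toList
  String.ofList (pvRunFold sizes text)

-- ===== PRECONDITION & SPEC =====
def Spec_results_info (CS : List (List (String × Int))) (out : String) : Prop := out = results_info_alt CS
instance (CS : List (List (String × Int))) (out : String) : Decidable (Spec_results_info CS out) := by unfold Spec_results_info; infer_instance

-- ===== CLAIM (what is proved, stated in full; the proofs are below) =====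
def Claim_equal_results_info : Prop := ∀ (CS : List (List (String × Int))), Dom_results_info CS → Spec_results_info CS (results_info CS)

-- ===== LEMMAS AND PROOFS =====

-- run-length pair list of a sorted list (proof helper mirroring pvRunFold's recursion)
def pvRle : List Int → List (Int × Int)
  | [] => []
  | s :: rest =>
    let run := (rest.takeWhile (fun y => y == s)).length
    (s, (1 + run : Int)) :: pvRle (rest.drop run)
termination_by l => l.length
decreasing_by simp


theorem pvRunFold_eq_foldl (l : List Int) (text : List Char) :
    pvRunFold l text = (pvRle l).foldl (fun t x => t ++ (", ").toList ++ PySem.Int.toChars x.2 ++ (" of size ").toList ++ PySem.Int.toChars x.1) text := by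
  fun_induction pvRunFold l text with
  | case1 text => simp [pvRle]
  | case2 s rest text run ih =>
    rw [pvRle]
    simp only [List.foldl_cons]
    simp only [run] at *
    have h1 : 1 + (rest.takeWhile (fun y => y == s)).length - 1 = (rest.takeWhile (fun y => y == s)).length := by omega
    have h2 : ((1 + (rest.takeWhile (fun y => y == s)).length : Nat) : Int) = 1 + ((rest.takeWhile (fun y => y == s)).length : Int) := by push_cast; ring
    rw [h1, h2] at ih
    rw [h1, h2]
    exact ih

theorem pvInsertBy_congr {α : Type} (f g : α → α → Bool) (x : α) (acc : List α)
    (h : ∀ b ∈ acc, f x b = g x b) :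
    PySem.List.insertBy f x acc = PySem.List.insertBy g x acc := by
  induction acc with
  | nil => rfl
  | cons y ys ih =>
    simp only [PySem.List.insertBy]
    rw [h y (by simp)]
    split
    · rfl
    · rw [ih (fun b hb => h b (by simp [hb]))]

theorem pvFoldl_insertBy_congr {α : Type} (f g : α → α → Bool) (S : α → Prop) (xs acc : List α)
    (hfg : ∀ a b, S a → S b → f a b = g a b) (hxs : ∀ a ∈ xs, S a) (hacc : ∀ b ∈ acc, S b) :
    xs.foldl (fun acc x => PySem.List.insertBy f x acc) acc
      = xs.foldl (fun acc x => PySem.List.insertBy g x acc) acc := by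
  induction xs generalizing acc with
  | nil => rfl
  | cons a as ih =>
    simp only [List.foldl_cons]
    rw [pvInsertBy_congr f g a acc (fun b hb => hfg a b (hxs a (by simp)) (hacc b hb))]
    exact ih _ (fun a' ha' => hxs a' (by simp [ha']))
      (fun b hb => by
        rcases (PySem.List.mem_insertBy (before := g) (x := a) (ys := acc) (y := b)).mp hb with h1 | h2
        · exact h1 ▸ hxs a (by simp)
        · exact hacc b h2)

theorem pvSorted2_eq_sorted_fst (xs : List (Int × Int))
    (hinj : ∀ a ∈ xs, ∀ b ∈ xs, a.1 = b.1 → a = b) :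
    PySem.List.sorted2 xs Prod.fst Prod.snd = PySem.List.sorted xs Prod.fst := by
  show xs.foldl (fun acc x => PySem.List.insertBy _ x acc) [] = xs.foldl (fun acc x => PySem.List.insertBy _ x acc) []
  apply pvFoldl_insertBy_congr _ _ (fun a => a ∈ xs)
  · intro a b ha hb
    by_cases h1 : a.1 < b.1
    · simp [h1]
    · by_cases h2 : b.1 < a.1
      · simp [h1, h2]
      · have : a = b := hinj a ha b hb (le_antisymm (not_lt.mp h2) (not_lt.mp h1))
        subst this
        simp
  · exact fun a ha => ha
  · simp

theorem pvRle_spec (m : List Int) : m.Pairwise (fun a b => a ≤ b) →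
    (pvRle m).Pairwise (fun a b => a.1 < b.1) ∧
      (∀ s k, ((s, k) ∈ pvRle m ↔ s ∈ m ∧ k = (m.count s : Int))) := by
  induction m using pvRle.induct with
  | case1 => intro _; simp [pvRle]
  | case2 s rest run ih =>
    intro hp
    have hs : ∀ y ∈ rest, s ≤ y := (List.pairwise_cons.mp hp).1
    have hrest : rest.Pairwise (fun a b => a ≤ b) := (List.pairwise_cons.mp hp).2
    have hdrop : rest.drop run = rest.dropWhile (fun y => y == s) := by
      show rest.drop (rest.takeWhile (fun y => y == s)).length = _
      nth_rewrite 2 [← List.takeWhile_append_dropWhile (p := fun y => y == s) (l := rest)]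
      rw [List.drop_left]
    have hsplit : rest = rest.takeWhile (fun y => y == s) ++ rest.drop run := by
      rw [hdrop]; exact (List.takeWhile_append_dropWhile).symm
    have hdP : (rest.drop run).Pairwise (fun a b => a ≤ b) :=
      List.Pairwise.sublist (List.drop_sublist _ _) hrest
    have hrun_eq : ∀ y ∈ rest.takeWhile (fun y => y == s), y = s := by
      intro y hy
      have := List.mem_takeWhile_imp hy
      simpa using this
    have hd_mem : ∀ y ∈ rest.drop run, y ∈ rest := fun y hy => (List.drop_sublist _ _).subset hy
    have hd_gt : ∀ y ∈ rest.drop run, s < y := by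
      cases hdd : rest.drop run with
      | nil => simp
      | cons h t =>
        have hdw : rest.dropWhile (fun y => y == s) = h :: t := hdrop.symm.trans hdd
        have hne : (h == s) = false := by
          have h2 := List.head_dropWhile_not (fun y => y == s) (l := rest) (by rw [hdw]; simp)
          simpa [hdw] using h2
        have hsh : s < h := lt_of_le_of_ne (hs h (hd_mem h (by rw [hdd]; simp)))
          (fun e => by simp [e] at hne)
        intro y hy
        rcases List.mem_cons.mp hy with h1 | h2
        · exact h1 ▸ hsh
        · have hph : h ≤ y := (List.pairwise_cons.mp (hdd ▸ hdP)).1 y h2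
          exact lt_of_lt_of_le hsh hph
    have hs_not_d : s ∉ rest.drop run := fun hsd => lt_irrefl s (hd_gt s hsd)
    have hcount_run : (rest.takeWhile (fun y => y == s)).count s = run :=
      List.count_eq_length.mpr (fun b hb => (hrun_eq b hb).symm)
    have hds : (rest.drop run).count s = 0 := List.count_eq_zero.mpr hs_not_d
    have hrc : rest.count s = run := by
      conv_lhs => rw [hsplit]
      rw [List.count_append, hcount_run, hds]
      omega
    have hcnt : ∀ s', s' ≠ s → (s :: rest).count s' = (rest.drop run).count s' := by
      intro s' hne
      have h0 : (rest.takeWhile (fun y => y == s)).count s' = 0 :=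
        List.count_eq_zero.mpr (fun hc => hne (hrun_eq s' hc))
      rw [List.count_cons]
      conv_lhs => rw [hsplit]
      rw [List.count_append, h0]
      simp [Ne.symm hne]
    obtain ⟨ihP, ihM⟩ := ih hdP
    rw [pvRle]
    constructor
    · refine List.pairwise_cons.mpr ⟨?_, ihP⟩
      intro p hp'
      obtain ⟨p1, p2⟩ := p
      exact hd_gt p1 ((ihM p1 p2).mp hp').1
    · intro s' k
      simp only [List.mem_cons, Prod.mk.injEq]
      constructor
      · rintro (⟨rfl, rfl⟩ | hmem)
        · refine ⟨Or.inl rfl, ?_⟩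
          rw [List.count_cons_self, hrc]
          push_cast
          ring
        · obtain ⟨hsd, hk⟩ := (ihM s' k).mp hmem
          have hne : s' ≠ s := fun e => hs_not_d (e ▸ hsd)
          refine ⟨Or.inr (hd_mem s' hsd), ?_⟩
          rw [hk, hcnt s' hne]
      · rintro ⟨hmem, hk⟩
        by_cases he : s' = s
        · subst he
          left
          refine ⟨rfl, ?_⟩
          rw [hk, List.count_cons_self, hrc]
          push_cast
          ring
        · right
          have hsr : s' ∈ rest := by rcases hmem with h1 | h2; exact absurd h1 he; exact h2
          have hsd : s' ∈ rest.drop run := by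
            rcases (by rw [hsplit] at hsr; exact List.mem_append.mp hsr : s' ∈ rest.takeWhile (fun y => y == s) ∨ s' ∈ rest.drop run) with h1 | h2
            · exact absurd (hrun_eq s' h1) he
            · exact h2
          refine (ihM s' k).mpr ⟨hsd, ?_⟩
          rw [hk, hcnt s' he]

theorem pvRle_perm (l : List Int) :
    (pvRle (PySem.List.sorted l (fun z => z))).Perm
      (PySem.Set.ofList (l.map (fun el => (el, (l.count el : Int))))) := by
  have hperm : (PySem.List.sorted l (fun z => z)).Perm l := PySem.List.sorted_perm l _ _
  have hp : (PySem.List.sorted l (fun z => z)).Pairwise (fun a b => a ≤ b) :=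
    PySem.List.sorted_pairwise l (fun z => z)
  obtain ⟨hP, hM⟩ := pvRle_spec _ hp
  have hnd1 : (pvRle (PySem.List.sorted l (fun z => z))).Nodup :=
    hP.imp (fun h e => absurd (congrArg Prod.fst e) (ne_of_lt h))
  have hnd2 := PySem.Set.nodup_ofList (l.map (fun el => (el, (l.count el : Int))))
  rw [List.perm_ext_iff_of_nodup hnd1 hnd2]
  rintro ⟨p1, p2⟩
  rw [hM p1 p2, PySem.Set.mem_ofList, List.mem_map]
  constructor
  · rintro ⟨h1, h2⟩
    exact ⟨p1, hperm.mem_iff.mp h1, by rw [h2, hperm.count_eq]⟩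
  · rintro ⟨el, hel, heq⟩
    obtain ⟨he1, he2⟩ := Prod.mk.injEq .. ▸ heq
    subst he1
    exact ⟨hperm.mem_iff.mpr hel, by rw [← he2, hperm.count_eq]⟩

theorem pvPairs_eq (l : List Int) :
    PySem.List.sorted2 (PySem.Set.ofList (l.map (fun el => (el, (l.count el : Int))))) Prod.fst Prod.snd
      = pvRle (PySem.List.sorted l (fun z => z)) := by
  have hinj : ∀ a ∈ PySem.Set.ofList (l.map (fun el => (el, (l.count el : Int)))),
      ∀ b ∈ PySem.Set.ofList (l.map (fun el => (el, (l.count el : Int)))), a.1 = b.1 → a = b := by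
    intro a ha b hb h1
    rw [PySem.Set.mem_ofList, List.mem_map] at ha hb
    obtain ⟨ea, _, rfl⟩ := ha
    obtain ⟨eb, _, rfl⟩ := hb
    simp only at h1
    subst h1
    rfl
  rw [pvSorted2_eq_sorted_fst _ hinj]
  exact PySem.List.sorted_eq_of_perm_of_pairwise_lt _ _ Prod.fst (pvRle_perm l)
    (pvRle_spec _ (PySem.List.sorted_pairwise l (fun z => z))).1

-- ===== VERDICT (by name: the statement is the Claim_ definition above) =====
theorem results_info_spec : Claim_equal_results_info := by
  intro CS _
  unfold Spec_results_info results_info results_info_alt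
  dsimp only
  rw [pvRunFold_eq_foldl, ← pvPairs_eq]
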